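-- pv_equiv track=rewrite | github.com/Danlemann/BSUIR | 4_sem/3lb/method_c_t.py | lab_disunction_form
-- ===== SOURCE A (Python) =====
-- def lab_disunction_form(data_table_konst: list, element_in_table_part: str):
--     rezultation_output = list()
--
--     if element_in_table_part[0] == '(' and element_in_table_part[-1] == ')':
--         element_in_table_part = element_in_table_part[1:-1]
--
--     for iterator_to_table in range(len(data_table_konst)):
--         element_key_count = 0
--         lab_dis_for(data_table_konst, element_in_table_part, element_key_count, iterator_to_table, rezultation_output)
--
--     return rezultation_output
--
-- def lab_dis_for(data_table_konst, element_in_table_part, element_key_count, iterator_to_table, rezultation_output):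
--     for iterator in range(len(element_in_table_part.split('*'))):
--         if not element_in_table_part.split('*')[iterator] in data_table_konst[iterator_to_table][1:-1].split('*'):
--             rezultation_output.append('')
--             break
--         else:
--             element_key_count += 1
--     if element_key_count == len(element_in_table_part.split('*')):
--         rezultation_output.append('X')
-- ===== SOURCE B (Python) =====
-- def lab_disunction_form(data_table_konst: list, element_in_table_part: str):
--     # Strip the outer parentheses exactly as A does (guarded so "" is handled).
--     if element_in_table_part and element_in_table_part[0] == '(' and element_in_table_part[-1] == ')':
--         element_in_table_part = element_in_table_part[1:-1]
--     # Inverted index: term -> set of row indices whose term list contains it.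
--     index = {}
--     for i, row in enumerate(data_table_konst):
--         for term in set(row[1:-1].split('*')):
--             index.setdefault(term, set()).add(i)
--     # Intersect the row sets of all query conjuncts (split is never empty).
--     matching = None
--     for term in element_in_table_part.split('*'):
--         rows = index.get(term, set())
--         matching = rows if matching is None else matching & rows
--     return ['X' if i in matching else '' for i in range(len(data_table_konst))]
-- ===== Notes on version B (the rewrite author's own statement) =====
-- stated objective: faster
-- what changed: Replaces A's per-row helper that re-splits the query for every row and linearly scans the row's term list for each conjunct by a one-pass inverted index (term -> set of row indices), a set intersection over the query's conjuncts, and a final membership map over row indices.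
import Mathlib
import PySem

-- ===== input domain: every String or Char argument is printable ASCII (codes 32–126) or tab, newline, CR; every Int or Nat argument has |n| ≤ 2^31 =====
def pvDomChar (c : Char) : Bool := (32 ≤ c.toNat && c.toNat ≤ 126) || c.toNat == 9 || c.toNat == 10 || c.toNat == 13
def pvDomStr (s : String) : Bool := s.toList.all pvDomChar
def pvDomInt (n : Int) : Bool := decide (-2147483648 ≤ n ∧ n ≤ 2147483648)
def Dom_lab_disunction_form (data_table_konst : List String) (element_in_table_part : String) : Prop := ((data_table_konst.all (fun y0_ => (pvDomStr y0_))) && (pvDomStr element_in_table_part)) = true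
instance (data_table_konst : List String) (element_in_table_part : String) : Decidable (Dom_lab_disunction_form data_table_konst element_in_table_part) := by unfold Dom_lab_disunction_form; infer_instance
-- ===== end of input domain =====

-- B replaces A's per-row re-scan (the query re-split for every row, each conjunct scanned
-- against the row's term list) by a one-pass inverted index term → row-index set, an
-- intersection over the query's conjuncts, and a final membership map over the row indices;
-- objective: faster (measurably so in a timing run).

-- ===== PORT A =====
-- inner 'for iterator in range(len(split))' of lab_dis_for: returns (count, broke)
def pvLabDisLoop (qterms rowterms : List String) (cnt : Int) : Int × Bool :=
  match qterms with
  | [] => (cnt, false)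
  | t :: rest =>
    if ¬ (rowterms.contains t = true) then (cnt, true)
    else pvLabDisLoop rest rowterms (cnt + 1)

def lab_dis_for (data_table_konst : List String) (element_in_table_part : String)
    (element_key_count : Int) (iterator_to_table : Int)
    (rezultation_output : List String) : List String :=
  -- sep "*" is a nonempty literal, so split? is always some; getD [] never fires
  let qterms := (PySem.Str.split? element_in_table_part "*").getD []
  let row := PySem.List.pyGetD data_table_konst iterator_to_table ""
  let rowterms := (PySem.Str.split? (PySem.Str.slice row (some 1) (some (-1))) "*").getD []
  let r := pvLabDisLoop qterms rowterms element_key_count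
  let out := if r.2 then rezultation_output ++ [""] else rezultation_output
  if r.1 = PySem.List.len qterms then out ++ ["X"] else out

def lab_disunction_form (data_table_konst : List String) (element_in_table_part : String) : List String :=
  -- element_in_table_part[0] / [-1]: IndexError on "" — excluded by Pre_
  let q := if PySem.Str.pyGet? element_in_table_part 0 = some '(' ∧
              PySem.Str.pyGet? element_in_table_part (-1) = some ')' then
             PySem.Str.slice element_in_table_part (some 1) (some (-1))
           else element_in_table_part
  (PySem.List.pyRange 0 (PySem.List.len data_table_konst) 1).foldl
    (fun out i => lab_dis_for data_table_konst q 0 i out) []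

-- ===== PORT B =====
def pvRowTerms (row : String) : List String :=
  (PySem.Str.split? (PySem.Str.slice row (some 1) (some (-1))) "*").getD []

def pvBuildIndex (data_table_konst : List String) : PySem.Dict String (PySem.Set Int) :=
  (PySem.List.enumerate data_table_konst).foldl
    (fun idx p =>
      (PySem.Set.ofList (pvRowTerms p.2)).foldl
        (fun idx t => idx.modify t [] (fun s => PySem.Set.add s p.1)) idx)
    PySem.Dict.empty

def lab_disunction_form_alt (data_table_konst : List String) (element_in_table_part : String) : List String :=
  let q := if element_in_table_part ≠ "" ∧
              PySem.Str.pyGet? element_in_table_part 0 = some '(' ∧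
              PySem.Str.pyGet? element_in_table_part (-1) = some ')' then
             PySem.Str.slice element_in_table_part (some 1) (some (-1))
           else element_in_table_part
  let idx := pvBuildIndex data_table_konst
  let matching : Option (PySem.Set Int) :=
    ((PySem.Str.split? q "*").getD []).foldl
      (fun m t =>
        let rows := idx.getD t []
        match m with
        | none => some rows
        | some s => some (PySem.Set.inter s rows)) none
  (PySem.List.pyRange 0 (PySem.List.len data_table_konst) 1).map
    (fun i => match matching with
              | some s => if PySem.Set.contains s i then "X" else ""
              | none => "")

-- ===== PRECONDITION & SPEC =====
-- Pre_ excludes only the empty query string, on which A raises IndexError at element_in_table_part[0]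
def Pre_lab_disunction_form (data_table_konst : List String) (element_in_table_part : String) : Prop :=
  element_in_table_part ≠ ""
instance (data_table_konst : List String) (element_in_table_part : String) : Decidable (Pre_lab_disunction_form data_table_konst element_in_table_part) := by unfold Pre_lab_disunction_form; infer_instance
def pvWitness_lab_disunction_form : List String × String := (["(a*b)", "(b)"], "(a*b)")

def Spec_lab_disunction_form (data_table_konst : List String) (element_in_table_part : String) (out : List String) : Prop := out = lab_disunction_form_alt data_table_konst element_in_table_part
instance (data_table_konst : List String) (element_in_table_part : String) (out : List String) : Decidable (Spec_lab_disunction_form data_table_konst element_in_table_part out) := by unfold Spec_lab_disunction_form; infer_instance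

-- ===== CLAIM (what is proved, stated in full; the proofs are below) =====
def Claim_equal_lab_disunction_form : Prop := ∀ (data_table_konst : List String) (element_in_table_part : String), Dom_lab_disunction_form data_table_konst element_in_table_part → Pre_lab_disunction_form data_table_konst element_in_table_part → Spec_lab_disunction_form data_table_konst element_in_table_part (lab_disunction_form data_table_konst element_in_table_part)

-- ===== LEMMAS AND PROOFS =====

-- the common row verdict: 'X' iff every query conjunct occurs among the row's terms
def pvHit (q : String) (row : String) : String :=
  if ((PySem.Str.split? q "*").getD []).all (fun t => (pvRowTerms row).contains t) then "X" else ""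

theorem pvLoop_all_true (qterms rowterms : List String) (c : Int)
    (h : qterms.all (fun t => rowterms.contains t) = true) :
    pvLabDisLoop qterms rowterms c = (c + qterms.length, false) := by
  induction qterms generalizing c with
  | nil => simp [pvLabDisLoop]
  | cons t rest ih =>
    simp only [List.all_cons, Bool.and_eq_true] at h
    simp only [pvLabDisLoop, h.1]
    rw [if_neg (by simp), ih _ h.2]
    simp only [List.length_cons, Prod.mk.injEq, and_true]
    push_cast
    ring

theorem pvLoop_all_false (qterms rowterms : List String) (c : Int)
    (h : qterms.all (fun t => rowterms.contains t) = false) :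
    (pvLabDisLoop qterms rowterms c).2 = true ∧
    (pvLabDisLoop qterms rowterms c).1 < c + qterms.length := by
  induction qterms generalizing c with
  | nil => simp at h
  | cons t rest ih =>
    by_cases hc : rowterms.contains t = true
    · simp only [List.all_cons, hc, Bool.true_and] at h
      simp only [pvLabDisLoop, hc]
      rw [if_neg (by simp)]
      obtain ⟨h1, h2⟩ := ih (c + 1) h
      refine ⟨h1, ?_⟩
      simp only [List.length_cons]
      push_cast
      omega
    · simp only [pvLabDisLoop, hc]
      rw [if_pos (by simp)]
      refine ⟨rfl, ?_⟩
      simp only [List.length_cons]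
      push_cast
      omega

theorem pvLab_dis_for_eq (data : List String) (q : String) (i : Int) (out : List String) :
    lab_dis_for data q 0 i out = out ++ [pvHit q (PySem.List.pyGetD data i "")] := by
  unfold lab_dis_for pvHit pvRowTerms
  dsimp only
  by_cases hall : ((PySem.Str.split? q "*").getD []).all
      (fun t => (((PySem.Str.split? (PySem.Str.slice (PySem.List.pyGetD data i "") (some 1) (some (-1))) "*").getD [])).contains t) = true
  · rw [pvLoop_all_true _ _ _ hall]
    rw [if_pos (by simp [PySem.List.len_eq]), if_neg (by simp), if_pos hall]
  · have h := pvLoop_all_false _ _ 0 (by simpa using hall)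
    rw [if_pos h.1, if_neg (by rw [PySem.List.len_eq]; omega), if_neg hall]

theorem pvA_eq_map (data : List String) (q : String) :
    (PySem.List.pyRange 0 (PySem.List.len data) 1).foldl
      (fun out i => lab_dis_for data q 0 i out) [] = data.map (pvHit q) := by
  have h1 : (fun (out : List String) (i : Int) => lab_dis_for data q 0 i out)
      = fun out i => out ++ [pvHit q (PySem.List.pyGetD data i "")] := by
    funext out i; exact pvLab_dis_for_eq data q i out
  rw [h1, PySem.List.foldl_pyRange_zero_pyGetD data "" (fun acc row => acc ++ [pvHit q row]) [],
      PySem.List.foldl_append_singleton_eq_map]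
  simp

theorem pvMem_modifyFold (ts : List String) (d : PySem.Dict String (PySem.Set Int)) (i j : Int) (t : String) :
    j ∈ (ts.foldl (fun idx t => idx.modify t [] (fun s => PySem.Set.add s i)) d).getD t [] ↔
      j ∈ d.getD t [] ∨ (t ∈ ts ∧ j = i) := by
  induction ts generalizing d with
  | nil => simp
  | cons t0 rest ih =>
    simp only [List.foldl_cons]
    rw [ih, PySem.Dict.getD_modify]
    split_ifs with h
    · subst h
      simp [PySem.Set.mem_add]
      tauto
    · simp
      tauto

theorem pvMem_enumFold (data : List String) (s : Int)
    (d : PySem.Dict String (PySem.Set Int)) (j : Int) (t : String) :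
    j ∈ ((PySem.List.enumerate data s).foldl
      (fun idx p => (PySem.Set.ofList (pvRowTerms p.2)).foldl
        (fun idx t => idx.modify t [] (fun s => PySem.Set.add s p.1)) idx) d).getD t [] ↔
    j ∈ d.getD t [] ∨ ∃ (k : Nat) (_ : k < data.length), j = s + k ∧ t ∈ pvRowTerms data[k] := by
  induction data generalizing s d with
  | nil => simp [PySem.List.enumerate_nil]
  | cons row rest ih =>
    rw [PySem.List.enumerate_cons]
    simp only [List.foldl_cons]
    rw [ih, pvMem_modifyFold]
    constructor
    · rintro ((hd | ⟨hmem, hj⟩) | ⟨k, hk, hj, hmem⟩)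
      · exact Or.inl hd
      · exact Or.inr ⟨0, by simp, by simpa using hj, by simpa [PySem.Set.mem_ofList] using hmem⟩
      · refine Or.inr ⟨k + 1, by simp only [List.length_cons]; omega, ?_, by simpa using hmem⟩
        push_cast at hj ⊢
        omega
    · rintro (hd | ⟨k, hk, hj, hmem⟩)
      · exact Or.inl (Or.inl hd)
      · cases k with
        | zero =>
          exact Or.inl (Or.inr ⟨by simpa [PySem.Set.mem_ofList] using hmem, by simpa using hj⟩)
        | succ k =>
          refine Or.inr ⟨k, by simp only [List.length_cons] at hk; omega, ?_, by simpa using hmem⟩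
          push_cast at hj ⊢
          omega

theorem pvMem_index (data : List String) (j : Int) (t : String) :
    j ∈ (pvBuildIndex data).getD t [] ↔
      ∃ (k : Nat) (_ : k < data.length), j = k ∧ t ∈ pvRowTerms data[k] := by
  unfold pvBuildIndex
  rw [pvMem_enumFold]
  simp

theorem pvFold_some (idx : PySem.Dict String (PySem.Set Int)) (ts : List String) (acc : PySem.Set Int) :
    ts.foldl (fun m t =>
        match m with
        | none => some (idx.getD t [])
        | some s => some (PySem.Set.inter s (idx.getD t []))) (some acc)
    = some (ts.foldl (fun s t => PySem.Set.inter s (idx.getD t [])) acc) := by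
  induction ts generalizing acc with
  | nil => rfl
  | cons t0 rest ih => simpa using ih (PySem.Set.inter acc (idx.getD t0 []))

theorem pvMem_interFold (idx : PySem.Dict String (PySem.Set Int)) (ts : List String)
    (acc : PySem.Set Int) (j : Int) :
    j ∈ ts.foldl (fun s t => PySem.Set.inter s (idx.getD t [])) acc ↔
      j ∈ acc ∧ ∀ t ∈ ts, j ∈ idx.getD t [] := by
  induction ts generalizing acc with
  | nil => simp
  | cons t0 rest ih =>
    simp only [List.foldl_cons]
    rw [ih]
    simp only [PySem.Set.mem_inter, List.mem_cons]
    constructor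
    · rintro ⟨⟨h1, h2⟩, h3⟩
      exact ⟨h1, fun t ht => ht.elim (fun he => he ▸ h2) (h3 t)⟩
    · rintro ⟨h1, h2⟩
      exact ⟨⟨h1, h2 t0 (Or.inl rfl)⟩, fun t ht => h2 t (Or.inr ht)⟩

theorem pvGo_ne_nil (sep : List Char) : ∀ (fuel : Nat) (l cur : List Char) (acc : List (List Char)),
    PySem.Chars.splitOn.go sep fuel l cur acc ≠ [] := by
  intro fuel
  induction fuel with
  | zero => intro l cur acc; simp [PySem.Chars.splitOn.go]
  | succ n ih =>
    intro l cur acc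
    cases l with
    | nil => simp [PySem.Chars.splitOn.go]
    | cons c rest =>
      rw [PySem.Chars.splitOn.go]
      split_ifs with h
      · exact ih _ _ _
      · exact ih _ _ _

theorem pvSplit_ne_nil (q : String) : (PySem.Str.split? q "*").getD [] ≠ [] := by
  simp only [PySem.Str.split?, PySem.Chars.split?]
  rw [if_neg (by decide)]
  simp only [Option.map_some, Option.getD_some, ne_eq, List.map_eq_nil_iff]
  exact pvGo_ne_nil _ _ _ _ _

theorem pvB_eq_map (data : List String) (q0 : String) :
    lab_disunction_form_alt data q0 = data.map (pvHit (if q0 ≠ "" ∧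
              PySem.Str.pyGet? q0 0 = some '(' ∧
              PySem.Str.pyGet? q0 (-1) = some ')' then
             PySem.Str.slice q0 (some 1) (some (-1)) else q0)) := by
  unfold lab_disunction_form_alt
  dsimp only
  set q := (if q0 ≠ "" ∧ PySem.Str.pyGet? q0 0 = some '(' ∧ PySem.Str.pyGet? q0 (-1) = some ')' then
             PySem.Str.slice q0 (some 1) (some (-1)) else q0) with hqdef
  obtain ⟨t0, rest, hcons⟩ : ∃ t0 rest, (PySem.Str.split? q "*").getD [] = t0 :: rest := by
    cases h : (PySem.Str.split? q "*").getD [] with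
    | nil => exact absurd h (pvSplit_ne_nil q)
    | cons a b => exact ⟨a, b, rfl⟩
  rw [hcons]
  simp only [List.foldl_cons]
  rw [pvFold_some]
  apply List.ext_getElem
  · simp [PySem.List.length_pyRange_one, PySem.List.len_eq]
  · intro k hk1 hk2
    simp only [List.getElem_map]
    rw [PySem.List.getElem_pyRange_one]
    have hklt : k < data.length := by
      simpa [PySem.List.length_pyRange_one, PySem.List.len_eq] using hk1
    have hcond : PySem.Set.contains
        (List.foldl (fun s t => PySem.Set.inter s ((pvBuildIndex data).getD t []))
          ((pvBuildIndex data).getD t0 []) rest) (0 + (k : Int))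
        = ((PySem.Str.split? q "*").getD []).all
            (fun t => (pvRowTerms data[k]).contains t) := by
      rw [Bool.eq_iff_iff]
      rw [PySem.Set.contains_iff, pvMem_interFold, hcons]
      have hone : ∀ t : String, ((k : Int) ∈ (pvBuildIndex data).getD t [] ↔ t ∈ pvRowTerms data[k]) := by
        intro t
        rw [pvMem_index]
        constructor
        · rintro ⟨k', hk', heq, hmem⟩
          have : k = k' := by omega
          subst this
          exact hmem
        · intro hmem
          exact ⟨k, hklt, rfl, hmem⟩
      simp only [List.all_eq_true, List.mem_cons, zero_add]
      constructor
      · rintro ⟨h1, h2⟩ t ht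
        rw [List.contains_iff_mem, ← hone t]
        rcases ht with rfl | ht
        · exact h1
        · exact h2 t ht
      · intro h
        refine ⟨(hone t0).mpr ?_, fun t ht => (hone t).mpr ?_⟩
        · have := h t0 (Or.inl rfl); rwa [List.contains_iff_mem] at this
        · have := h t (Or.inr ht); rwa [List.contains_iff_mem] at this
    rw [hcond]
    rfl

-- ===== VERDICT (by name: the statement is the Claim_ definition above) =====
theorem lab_disunction_form_spec : Claim_equal_lab_disunction_form := by
  intro data s _ hpre
  unfold Spec_lab_disunction_form
  unfold lab_disunction_form
  dsimp only
  rw [pvA_eq_map, pvB_eq_map]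
  have : (if s ≠ "" ∧ PySem.Str.pyGet? s 0 = some '(' ∧ PySem.Str.pyGet? s (-1) = some ')' then
            PySem.Str.slice s (some 1) (some (-1)) else s)
       = (if PySem.Str.pyGet? s 0 = some '(' ∧ PySem.Str.pyGet? s (-1) = some ')' then
            PySem.Str.slice s (some 1) (some (-1)) else s) := by
    by_cases h : PySem.Str.pyGet? s 0 = some '(' ∧ PySem.Str.pyGet? s (-1) = some ')'
    · rw [if_pos ⟨hpre, h⟩, if_pos h]
    · rw [if_neg (fun hc => h hc.2), if_neg h]
  rw [this]
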